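-- pv_equiv track=rewrite | github.com/KangminLim/CodingTest | 프로그래머스/1/92334. 신고 결과 받기/신고 결과 받기.py | solution
-- ===== SOURCE A (Python) =====
-- def solution(id_list, report, k):
--     answer = []
--     rdict = {}
--     adict = {}
--     for i in id_list:
--         rdict[i] = 0
--         adict[i] = 0
--     rset = set()
--     for r in report:
--         # 유저, 신고한 아이디
--         user,i = r.split(' ')
--         # 중복 신고 방지
--         if (user,i) in rset:
--             continue
--         else:
--             # 신고 내역
--             rset.add((user,i))
--             rdict[i] += 1
--
--     for user,i in rset:
--         if rdict[i] >= k: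
--             adict[user] += 1
--     for k in adict:
--         answer.append(adict[k])
--     return answer
-- ===== SOURCE B (Python) =====
-- def solution(id_list, report, k):
--     pairs = {tuple(r.split(' ')) for r in report}
--     return [sum(1 for j in id_list
--                 if sum(p[1] == j for p in pairs) >= k and (u, j) in pairs)
--             for u in id_list]
-- ===== Notes on version B (the rewrite author's own statement) =====
-- stated objective: alternative
-- what changed: B has no counter dicts and no crediting pass: it dedupes the reports into one pair set and answers each id_list position by a direct nested count -- for each reporter u it counts targets j whose distinct-report count reaches k and whom u reported; Pre_ additionally excludes id_list with duplicate ids, where A's dict-key collapse makes the output length accidental.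
-- outside the precondition, e.g. on solution(['a', 'a'], [], 1): A returns [0], B returns [0, 0]
import Mathlib
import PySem

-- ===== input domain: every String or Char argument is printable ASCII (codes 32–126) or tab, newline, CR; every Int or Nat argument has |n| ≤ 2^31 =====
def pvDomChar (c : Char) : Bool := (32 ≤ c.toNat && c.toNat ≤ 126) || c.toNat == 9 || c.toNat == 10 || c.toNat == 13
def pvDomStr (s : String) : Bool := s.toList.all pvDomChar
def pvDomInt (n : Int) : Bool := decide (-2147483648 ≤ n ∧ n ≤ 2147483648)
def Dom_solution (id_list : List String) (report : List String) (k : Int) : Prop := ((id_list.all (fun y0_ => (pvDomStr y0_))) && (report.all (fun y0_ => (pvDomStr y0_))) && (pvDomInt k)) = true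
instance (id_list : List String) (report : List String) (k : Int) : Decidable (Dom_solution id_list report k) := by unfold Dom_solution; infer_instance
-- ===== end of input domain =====

-- B replaces A's counter dicts and pair-crediting pass by a single deduped pair set queried with a
-- direct nested count (for each reporter u, count targets j with >= k distinct reports that u
-- reported); same return value on Pre_ (id_list without duplicates, well-formed reports);
-- objective: alternative (B trades A's linear staged passes for a dict-free quadratic direct count).


-- ===== PORT A =====
-- helper used by both ports: user, i = r.split(' ')  (the unpack raises outside Pre_, hence getD)
def parseA (r : String) : String × String :=
  let parts := (PySem.Str.split? r " ").getD []   -- sep ≠ "", so split? is exact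
  (parts.getD 0 "", parts.getD 1 "")

def solution (id_list : List String) (report : List String) (k : Int) : List Int :=
  -- rdict = adict = {i: 0 for i in id_list}
  let rdict0 : PySem.Dict String Int := id_list.foldl (fun d i => d.insert i 0) PySem.Dict.empty
  let adict : PySem.Dict String Int := id_list.foldl (fun d i => d.insert i 0) PySem.Dict.empty
  -- for r in report: dedup via rset, rdict[i] += 1  (KeyError outside Pre_, hence modify with default)
  let st := report.foldl (fun (st : PySem.Set (String × String) × PySem.Dict String Int) r =>
      let p := parseA r
      if p ∈ st.1 then st
      else (PySem.Set.add st.1 p, st.2.modify p.2 0 (· + 1)))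
    (PySem.Set.empty, rdict0)
  -- for user,i in rset: if rdict[i] >= k: adict[user] += 1   (KeyError outside Pre_)
  let adict2 := st.1.foldl (fun d p => if st.2.getD p.2 0 ≥ k then d.modify p.1 0 (· + 1) else d) adict
  -- for k in adict: answer.append(adict[k])
  adict2.values

-- ===== PORT B =====
def solution_alt (id_list : List String) (report : List String) (k : Int) : List Int :=
  -- pairs = {tuple(r.split(' ')) for r in report}
  let pairs : PySem.Set (String × String) := PySem.Set.ofList (report.map parseA)
  -- [sum(1 for j in id_list if sum(p[1]==j for p in pairs) >= k and (u, j) in pairs) for u in id_list]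
  id_list.map (fun u =>
    ((id_list.countP (fun j =>
        decide (k ≤ ((pairs.countP (fun p => p.2 == j)) : Int)) && decide ((u, j) ∈ pairs))) : Int))

-- ===== PRECONDITION & SPEC =====
-- Pre_ excludes (1) reports that do not split into exactly two ids of id_list, on which A raises
-- (ValueError on unpacking or KeyError on rdict[i] += 1 / adict[user] += 1), and (2) id_list with
-- duplicate ids, on which A's output length (one entry per DISTINCT id, dict-key collapse) is an
-- accidental corner while B returns one entry per id_list position.
def Pre_solution (id_list : List String) (report : List String) (k : Int) : Prop :=
  id_list.Nodup ∧
  ∀ r ∈ report, ((PySem.Str.split? r " ").getD []).length = 2 ∧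
    ∀ x ∈ (PySem.Str.split? r " ").getD [], x ∈ id_list
instance (id_list : List String) (report : List String) (k : Int) : Decidable (Pre_solution id_list report k) := by unfold Pre_solution; infer_instance

def pvWitness_solution : List String × List String × Int :=
  (["muzi", "frodo", "apeach", "neo"],
   ["muzi frodo", "apeach frodo", "frodo neo", "muzi neo", "apeach muzi"], 2)

def Spec_solution (id_list : List String) (report : List String) (k : Int) (out : List Int) : Prop := out = solution_alt id_list report k
instance (id_list : List String) (report : List String) (k : Int) (out : List Int) : Decidable (Spec_solution id_list report k out) := by unfold Spec_solution; infer_instance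

-- ===== CLAIM (what is proved, stated in full; the proofs are below) =====
def Claim_equal_solution : Prop := ∀ (id_list : List String) (report : List String) (k : Int), Dom_solution id_list report k → Pre_solution id_list report k → Spec_solution id_list report k (solution id_list report k)

-- ===== LEMMAS AND PROOFS =====

-- the parsed (user, target) pairs and their dedup
def pvPairs (report : List String) : List (String × String) := report.map parseA
def pvP (report : List String) : PySem.Set (String × String) := PySem.Set.ofList (pvPairs report)

-- two nodup lists with the same members have the same length
theorem pv_len_eq {α : Type} [DecidableEq α] {l₁ l₂ : List α} (h₁ : l₁.Nodup) (h₂ : l₂.Nodup)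
    (h : ∀ x, x ∈ l₁ ↔ x ∈ l₂) : l₁.length = l₂.length :=
  ((List.perm_ext_iff_of_nodup h₁ h₂).2 h).length_eq

theorem pv_getD_foldl_insert_const {ν : Type} (l : List String) (c : ν)
    (d : PySem.Dict String ν) (x : String) (h : d.getD x c = c) :
    (l.foldl (fun d i => d.insert i c) d).getD x c = c := by
  induction l generalizing d with
  | nil => exact h
  | cons i t ih =>
      simp only [List.foldl_cons]
      exact ih _ (by rw [PySem.Dict.getD_insert]; split <;> simp [h])

theorem pv_keys_foldl_insert_const {ν : Type} (l : List String) (c : ν) :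
    (l.foldl (fun d i => d.insert i c) PySem.Dict.empty).keys = PySem.Set.ofList l := by
  have h := PySem.Dict.keys_foldl_insert (ν := ν) l (fun _ _ => c) PySem.Dict.empty
  rw [h, PySem.Dict.keys_empty]
  rfl

-- a nodup list is its own set
theorem pv_update_disjoint {α : Type} [BEq α] [LawfulBEq α] (l : List α) :
    ∀ (s : PySem.Set α), (∀ x ∈ l, x ∉ s) → l.Nodup → PySem.Set.update s l = s ++ l := by
  induction l with
  | nil => intro s _ _; simp [PySem.Set.update]
  | cons x t ih =>
      intro s hdisj hnd
      have hx : x ∉ s := hdisj x (by simp)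
      have hadd : PySem.Set.add s x = s ++ [x] := by
        simp [PySem.Set.add, List.contains_eq_mem, hx]
      have : PySem.Set.update s (x :: t) = PySem.Set.update (s ++ [x]) t := by
        show PySem.Set.update (PySem.Set.add s x) t = _
        rw [hadd]
      rw [this, ih (s ++ [x])]
      · simp
      · intro y hy
        simp only [List.mem_append, List.mem_singleton]
        rintro (h | rfl)
        · exact hdisj y (by simp [hy]) h
        · exact (List.nodup_cons.1 hnd).1 hy
      · exact (List.nodup_cons.1 hnd).2

theorem pv_ofList_eq_self {α : Type} [BEq α] [LawfulBEq α] (l : List α) (h : l.Nodup) :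
    PySem.Set.ofList l = l := by
  have := pv_update_disjoint l ([] : PySem.Set α) (by simp) h
  simpa using this

-- A's report loop: the set accumulates every parsed pair; rdict counts seconds among NEW pairs
theorem pvA_fold_fst (l : List String) (s : PySem.Set (String × String))
    (d : PySem.Dict String Int) :
    (l.foldl (fun (st : PySem.Set (String × String) × PySem.Dict String Int) r =>
        if parseA r ∈ st.1 then st
        else (PySem.Set.add st.1 (parseA r), st.2.modify (parseA r).2 0 (· + 1))) (s, d)).1
      = PySem.Set.update s (l.map parseA) := by
  induction l generalizing s d with
  | nil => rfl
  | cons r t ih =>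
      simp only [List.foldl_cons, List.map_cons]
      by_cases hp : parseA r ∈ s
      · have hadd : PySem.Set.add s (parseA r) = s := by
          simp [PySem.Set.add, List.contains_eq_mem, hp]
        rw [if_pos hp, ih s d]
        show _ = PySem.Set.update (PySem.Set.add s (parseA r)) (t.map parseA)
        rw [hadd]
      · rw [if_neg hp]
        exact ih _ _

theorem pvA_fold_snd (l : List String) (s : PySem.Set (String × String))
    (d : PySem.Dict String Int) (j : String) :
    ((l.foldl (fun (st : PySem.Set (String × String) × PySem.Dict String Int) r =>
        if parseA r ∈ st.1 then st
        else (PySem.Set.add st.1 (parseA r), st.2.modify (parseA r).2 0 (· + 1))) (s, d)).2).getD j 0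
        + ((s.countP (fun p => p.2 == j) : Int))
      = d.getD j 0 + (((PySem.Set.update s (l.map parseA)).countP (fun p => p.2 == j) : Int)) := by
  induction l generalizing s d with
  | nil => rfl
  | cons r t ih =>
      simp only [List.foldl_cons, List.map_cons]
      by_cases hp : parseA r ∈ s
      · have hadd : PySem.Set.add s (parseA r) = s := by
          simp [PySem.Set.add, List.contains_eq_mem, hp]
        rw [if_pos hp, ih s d]
        show _ = _ + ((PySem.Set.update (PySem.Set.add s (parseA r)) (t.map parseA)).countP _ : Int)
        rw [hadd]
      · have hadd : PySem.Set.add s (parseA r) = s ++ [parseA r] := by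
          simp [PySem.Set.add, List.contains_eq_mem, hp]
        rw [if_neg hp]
        have hih := ih (PySem.Set.add s (parseA r)) (d.modify (parseA r).2 0 (· + 1))
        have hcnt : ((PySem.Set.add s (parseA r)).countP (fun p => p.2 == j) : Int)
            = (s.countP (fun p => p.2 == j) : Int) + (if (parseA r).2 = j then 1 else 0) := by
          rw [hadd, List.countP_append]
          by_cases h2 : (parseA r).2 = j <;> · simp [h2]
        have hmod : (d.modify (parseA r).2 0 (· + 1)).getD j 0
            = d.getD j 0 + (if (parseA r).2 = j then 1 else 0) := by
          rw [PySem.Dict.getD_modify]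
          by_cases h2 : (parseA r).2 = j
          · rw [if_pos h2.symm, if_pos h2, h2]
          · rw [if_neg (fun h => h2 h.symm), if_neg h2, add_zero]
        rw [hcnt, hmod] at hih
        show _ + (s.countP _ : Int)
          = _ + ((PySem.Set.update (PySem.Set.add s (parseA r)) (t.map parseA)).countP _ : Int)
        omega

-- getD through A's conditional counting loop
theorem pvA_cond_fold (C : String × String → Prop) [DecidablePred C]
    (l : List (String × String)) (d : PySem.Dict String Int) (u : String) :
    (l.foldl (fun d p => if C p then d.modify p.1 0 (· + 1) else d) d).getD u 0
      = d.getD u 0 + ((l.countP (fun p => decide (C p) && (p.1 == u)) : Int)) := by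
  induction l generalizing d with
  | nil => simp
  | cons p t ih =>
      simp only [List.foldl_cons, List.countP_cons]
      by_cases hC : C p
      · rw [if_pos hC, ih]
        have hmod : (d.modify p.1 0 (· + 1)).getD u 0
            = d.getD u 0 + (if p.1 = u then 1 else 0) := by
          rw [PySem.Dict.getD_modify]
          by_cases h1 : p.1 = u
          · rw [if_pos h1.symm, if_pos h1, h1]
          · rw [if_neg (fun h => h1 h.symm), if_neg h1, add_zero]
        rw [hmod]
        by_cases h1 : p.1 = u <;> simp [hC, h1] <;> omega
      · rw [if_neg hC, ih]
        simp [hC]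

-- A's conditional loops do not create keys when every touched key is present
theorem pvA_cond_fold_keys (C : String × String → Prop) [DecidablePred C]
    (l : List (String × String)) (d : PySem.Dict String Int)
    (h : ∀ p ∈ l, p.1 ∈ d.keys) :
    (l.foldl (fun d p => if C p then d.modify p.1 0 (· + 1) else d) d).keys = d.keys := by
  induction l generalizing d with
  | nil => rfl
  | cons p t ih =>
      simp only [List.foldl_cons]
      have hkeys : ∀ (d' : PySem.Dict String Int), d'.keys = d.keys →
          (if C p then d'.modify p.1 0 (· + 1) else d').keys = d.keys := by
        intro d' hd'
        by_cases hC : C p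
        · rw [if_pos hC, PySem.Dict.keys_modify,
            PySem.Dict.keys_insert_of_contains]
          · exact hd'
          · rw [PySem.Dict.contains_iff_mem_keys, hd']
            exact h p (by simp)
        · rw [if_neg hC]; exact hd'
      rw [ih _ (fun q hq => (hkeys d rfl) ▸ h q (by simp [hq])), hkeys d rfl]

-- a corollary of the two A-loop lemmas, in the exact shape the unfolded port shows
theorem pvA_rdict (id_list report : List String) (j : String) :
    ((report.foldl (fun (st : PySem.Set (String × String) × PySem.Dict String Int) r =>
        if parseA r ∈ st.1 then st
        else (PySem.Set.add st.1 (parseA r), st.2.modify (parseA r).2 0 (· + 1)))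
      (PySem.Set.empty, id_list.foldl (fun d i => d.insert i 0) PySem.Dict.empty)).2).getD j 0
      = (((pvP report).countP (fun q => q.2 == j) : Int)) := by
  have h := pvA_fold_snd report PySem.Set.empty
    (id_list.foldl (fun d i => d.insert i 0) (PySem.Dict.empty : PySem.Dict String Int)) j
  have h0 : ((id_list.foldl (fun d i => d.insert i 0)
      (PySem.Dict.empty : PySem.Dict String Int))).getD j 0 = 0 :=
    pv_getD_foldl_insert_const _ _ _ _ (by rw [PySem.Dict.getD_empty])
  have he : (((PySem.Set.empty : PySem.Set (String × String)).countP (fun p => p.2 == j) : Nat) : Int) = 0 := by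
    rfl
  rw [h0, he, add_zero, zero_add] at h
  exact h.trans rfl

theorem pv_pairs_mem (id_list report : List String) (k : Int)
    (h : Pre_solution id_list report k) :
    ∀ p ∈ pvPairs report, p.1 ∈ id_list ∧ p.2 ∈ id_list := by
  intro p hp
  simp only [pvPairs, List.mem_map] at hp
  obtain ⟨r, hr, rfl⟩ := hp
  obtain ⟨hlen, hmem⟩ := h.2 r hr
  rcases hps : (PySem.Str.split? r " ").getD [] with _ | ⟨u, _ | ⟨v, _ | w⟩⟩ <;>
      rw [hps] at hlen hmem <;> try simp at hlen
  constructor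
  · have := hmem u (by simp)
    simpa [parseA, hps] using this
  · have := hmem v (by simp)
    simpa [parseA, hps] using this

-- A reduced to a closed form: one count over the deduped pairs per output position
theorem pvA_eq (id_list report : List String) (k : Int) (hids : id_list.Nodup)
    (hp : ∀ p ∈ pvPairs report, p.1 ∈ id_list ∧ p.2 ∈ id_list) :
    solution id_list report k
      = id_list.map (fun u =>
          (((pvP report).countP (fun p =>
            decide (k ≤ ((pvP report).countP (fun q => q.2 == p.2) : Int)) && (p.1 == u))) : Int)) := by
  simp only [solution, ge_iff_le]
  rw [pvA_fold_fst]
  simp only [pvA_rdict]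
  have hPP : PySem.Set.update (PySem.Set.empty : PySem.Set (String × String)) (report.map parseA)
      = pvP report := rfl
  rw [hPP]
  have hkeys : ((id_list.foldl (fun d i => d.insert i 0)
      (PySem.Dict.empty : PySem.Dict String Int))).keys = id_list := by
    rw [pv_keys_foldl_insert_const, pv_ofList_eq_self _ hids]
  have hkeys2 := pvA_cond_fold_keys
    (fun p => k ≤ ((pvP report).countP (fun q => q.2 == p.2) : Int)) (pvP report)
    (id_list.foldl (fun d i => d.insert i 0) (PySem.Dict.empty : PySem.Dict String Int))
    (fun p hp' => by
      rw [hkeys]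
      exact (hp p (by simpa [pvPairs] using (PySem.Set.mem_ofList _ p).1 hp')).1)
  rw [PySem.Dict.values_eq_map_keys _ (by rw [hkeys2, hkeys]; exact hids) 0, hkeys2, hkeys]
  apply List.map_congr_left
  intro u _
  have h3 := pvA_cond_fold
    (fun p => k ≤ ((pvP report).countP (fun q => q.2 == p.2) : Int)) (pvP report)
    (id_list.foldl (fun d i => d.insert i 0) (PySem.Dict.empty : PySem.Dict String Int)) u
  rw [pv_getD_foldl_insert_const _ _ _ _ (by rw [PySem.Dict.getD_empty]), zero_add] at h3
  exact h3

-- the core identity: counting suspended pairs with first u = counting targets u reported that are suspended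
theorem pv_main (id_list report : List String) (k : Int) (hids : id_list.Nodup)
    (hp : ∀ p ∈ pvPairs report, p.1 ∈ id_list ∧ p.2 ∈ id_list) (u : String) :
    (((pvP report).countP (fun p =>
        decide (k ≤ ((pvP report).countP (fun q => q.2 == p.2) : Int)) && (p.1 == u))) : Int)
      = ((id_list.countP (fun j =>
        decide (k ≤ ((pvP report).countP (fun q => q.2 == j) : Int)) && decide ((u, j) ∈ pvP report))) : Int) := by
  norm_cast
  rw [List.countP_eq_length_filter, List.countP_eq_length_filter,
    show ((((pvP report).filter (fun p =>
        decide (k ≤ ((pvP report).countP (fun q => q.2 == p.2) : Int)) && (p.1 == u))).length)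
      = (((pvP report).filter (fun p =>
        decide (k ≤ ((pvP report).countP (fun q => q.2 == p.2) : Int)) && (p.1 == u))).map (·.2)).length)
      from (List.length_map ..).symm]
  refine pv_len_eq ?_ ?_ ?_
  · apply List.Nodup.map_on
    · rintro ⟨a, b⟩ hx ⟨c, e⟩ hy hxy
      obtain ⟨-, ha⟩ : k ≤ ((pvP report).countP (fun q => q.2 == b) : Int) ∧ a = u := by
        simpa using (List.mem_filter.1 hx).2
      obtain ⟨-, hc⟩ : k ≤ ((pvP report).countP (fun q => q.2 == e) : Int) ∧ c = u := by
        simpa using (List.mem_filter.1 hy).2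
      simp_all
    · exact ((PySem.Set.nodup_ofList _).filter _)
  · exact hids.filter _
  · intro j
    simp only [List.mem_map, List.mem_filter, Bool.and_eq_true, decide_eq_true_eq, beq_iff_eq]
    constructor
    · rintro ⟨⟨a, b⟩, ⟨hq, hk', ha⟩, rfl⟩
      dsimp only at hk' ha ⊢
      subst ha
      exact ⟨(hp (a, b) (by simpa [pvPairs] using (PySem.Set.mem_ofList _ _).1 hq)).2, hk', hq⟩
    · rintro ⟨hj, hk', hu⟩
      exact ⟨(u, j), ⟨hu, hk', rfl⟩, rfl⟩

-- ===== VERDICT (by name: the statement is the Claim_ definition above) =====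
theorem solution_spec : Claim_equal_solution := by
  intro id_list report k _ hpre
  have hp := pv_pairs_mem id_list report k hpre
  show solution id_list report k = solution_alt id_list report k
  rw [pvA_eq id_list report k hpre.1 hp]
  show _ = id_list.map (fun u =>
    ((id_list.countP (fun j =>
        decide (k ≤ (((pvP report).countP (fun p => p.2 == j)) : Int)) && decide ((u, j) ∈ pvP report))) : Int))
  exact List.map_congr_left (fun u _ => pv_main id_list report k hpre.1 hp u)
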